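-- pv_equiv track=rewrite | github.com/prady2002/localforge | localforge/chat/tools.py | _get_match_context
-- ===== SOURCE A (Python) =====
-- def _get_match_context(text: str, pattern: str, max_matches: int = 3) -> str:
--     """Return context lines around each match location for disambiguation."""
--     lines = text.splitlines()
--     positions: list[int] = []
--     start = 0
--     while True:
--         idx = text.find(pattern, start)
--         if idx == -1 or len(positions) >= max_matches:
--             break
--         positions.append(idx)
--         start = idx + 1
--
--     if not positions:
--         return ""
--
--     parts = ["Matches found at:"]
--     for pos in positions:
--         line_num = text[:pos].count("\n") + 1
--         start_l = max(0, line_num - 3)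
--         end_l = min(len(lines), line_num + 3)
--         context_lines = lines[start_l:end_l]
--         numbered = [f"  L{start_l + i + 1}: {l}" for i, l in enumerate(context_lines)]
--         parts.append(f"\n--- Match at line {line_num} ---")
--         parts.extend(numbered)
--
--     return "\n".join(parts)
-- ===== SOURCE B (Python) =====
-- import bisect
--
-- def _get_match_context(text: str, pattern: str, max_matches: int = 3) -> str:
--     """Context lines around each match; newline offsets indexed once, line numbers via bisect,
--     output built by direct concatenation instead of a parts list."""
--     positions: list[int] = []
--     start = 0
--     while len(positions) < max_matches:
--         idx = text.find(pattern, start)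
--         if idx == -1:
--             break
--         positions.append(idx)
--         start = idx + 1
--
--     if not positions:
--         return ""
--
--     lines = text.splitlines()
--     newline_offsets = [i for i, ch in enumerate(text) if ch == "\n"]
--     out = "Matches found at:"
--     for pos in positions:
--         line_num = bisect.bisect_left(newline_offsets, pos) + 1
--         lo = max(0, line_num - 3)
--         hi = min(len(lines), line_num + 3)
--         out += f"\n\n--- Match at line {line_num} ---"
--         for j in range(lo, hi):
--             out += f"\n  L{j + 1}: {lines[j]}"
--     return out
-- ===== Notes on version B (the rewrite author's own statement) =====
-- stated objective: alternative
-- what changed: Line numbers come from a once-built index of newline offsets queried with bisect_left instead of counting '\n' in a fresh text[:pos] slice per match, and the report is built by direct string concatenation instead of a parts list joined at the end.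
import Mathlib
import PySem

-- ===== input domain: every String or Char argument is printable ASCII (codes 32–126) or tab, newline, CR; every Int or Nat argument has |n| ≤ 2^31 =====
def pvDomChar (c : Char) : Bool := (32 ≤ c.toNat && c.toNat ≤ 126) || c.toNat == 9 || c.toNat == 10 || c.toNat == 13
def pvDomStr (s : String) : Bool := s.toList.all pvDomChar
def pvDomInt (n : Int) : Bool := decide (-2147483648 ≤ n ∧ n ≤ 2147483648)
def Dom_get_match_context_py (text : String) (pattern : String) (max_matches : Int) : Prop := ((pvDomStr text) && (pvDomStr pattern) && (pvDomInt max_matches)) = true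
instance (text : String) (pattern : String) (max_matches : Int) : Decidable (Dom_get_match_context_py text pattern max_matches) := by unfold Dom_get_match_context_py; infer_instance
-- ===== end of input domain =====

-- B changes how line numbers are computed (a newline-offset index queried with bisect_left instead of
-- counting '\n' in text[:pos] per match) and builds the report by direct concatenation instead of a
-- joined parts list; same return value, no speed claim.

-- termination helper for both find loops (cited by the ports' decreasing_by)
theorem pvFindFrom_bounds (s sub : List Char) (k : Nat)
    (h : PySem.Chars.findFrom s sub (k : Int) none ≠ -1) :
    k ≤ s.length ∧ (k : Int) ≤ PySem.Chars.findFrom s sub (k : Int) none := by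
  by_cases hk : k ≤ s.length
  · exact ⟨hk, (PySem.Chars.findFrom_natCast_spec s sub k hk h).1⟩
  · exfalso; apply h
    unfold PySem.Chars.findFrom
    simp only []
    have h1 : ¬ ((k : Int) < 0) := by omega
    have h3 : (s.length : Int) < (k : Int) := by exact_mod_cast Nat.lt_of_not_le hk
    simp [h1, h3]

-- ===== PORT A =====
-- the while-True find loop of A, step for step (start is 0 or idx+1, always a Nat)
def pvLoopA (t pat : List Char) (mm : Int) (positions : List Int) (start : Nat) : List Int :=
  let idx := PySem.Chars.findFrom t pat (start : Int) none
  if idx = -1 ∨ mm ≤ (positions.length : Int) then positions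
  else pvLoopA t pat mm (positions ++ [idx]) (idx.toNat + 1)
termination_by t.length + 1 - start
decreasing_by
  rename_i hcond
  push Not at hcond
  have hb := pvFindFrom_bounds t pat start hcond.1
  omega

def get_match_context_py (text : String) (pattern : String) (max_matches : Int) : String :=
  let t := text.toList
  let lines := PySem.Chars.splitlines t
  let positions := pvLoopA t pattern.toList max_matches [] 0
  if positions = [] then ""
  else
    let parts := positions.foldl (fun parts pos =>
      let line_num : Int := (PySem.Chars.count (PySem.Chars.slice t none (some pos)) ['\n'] : Int) + 1
      let start_l := max 0 (line_num - 3)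
      let end_l := min (lines.length : Int) (line_num + 3)
      let context_lines := PySem.List.slice lines (some start_l) (some end_l)
      let numbered := (PySem.List.enumerate context_lines 0).map (fun p =>
        "  L".toList ++ (PySem.Int.toStr (start_l + p.1 + 1)).toList ++ ": ".toList ++ p.2)
      parts ++ [("\n--- Match at line ".toList ++ (PySem.Int.toStr line_num).toList ++ " ---".toList)]
        ++ numbered) ["Matches found at:".toList]
    String.ofList (PySem.Chars.join ['\n'] parts)

-- ===== PORT B =====
-- B's find loop: 'while len(positions) < max_matches' with an inner break on -1
def pvLoopB (t pat : List Char) (mm : Int) (positions : List Int) (start : Nat) : List Int :=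
  if (positions.length : Int) < mm then
    let idx := PySem.Chars.findFrom t pat (start : Int) none
    if h : idx = -1 then positions
    else pvLoopB t pat mm (positions ++ [idx]) (idx.toNat + 1)
  else positions
termination_by t.length + 1 - start
decreasing_by
  have hb := pvFindFrom_bounds t pat start h
  omega

def get_match_context_py_alt (text : String) (pattern : String) (max_matches : Int) : String :=
  let t := text.toList
  let positions := pvLoopB t pattern.toList max_matches [] 0
  if positions = [] then ""
  else
    let lines := PySem.Chars.splitlines t
    let nl := ((PySem.List.enumerate t 0).filter (fun p => p.2 == '\n')).map (·.1)
    let out := positions.foldl (fun out pos =>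
      let line_num : Int := (PySem.List.bisectLeft nl pos : Int) + 1
      let lo := max 0 (line_num - 3)
      let hi := min (lines.length : Int) (line_num + 3)
      let out := out ++ "\n\n--- Match at line ".toList ++ (PySem.Int.toStr line_num).toList ++ " ---".toList
      (PySem.List.pyRange lo hi 1).foldl (fun out j =>
        out ++ "\n  L".toList ++ (PySem.Int.toStr (j + 1)).toList ++ ": ".toList
          ++ PySem.List.pyGetD lines j []) out) "Matches found at:".toList
    String.ofList out

-- ===== PRECONDITION & SPEC =====
def Spec_get_match_context_py (text : String) (pattern : String) (max_matches : Int) (out : String) : Prop := out = get_match_context_py_alt text pattern max_matches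
instance (text : String) (pattern : String) (max_matches : Int) (out : String) : Decidable (Spec_get_match_context_py text pattern max_matches out) := by unfold Spec_get_match_context_py; infer_instance

-- ===== CLAIM (what is proved, stated in full; the proofs are below) =====
def Claim_equal_get_match_context_py : Prop := ∀ (text : String) (pattern : String) (max_matches : Int), Dom_get_match_context_py text pattern max_matches → Spec_get_match_context_py text pattern max_matches (get_match_context_py text pattern max_matches)

-- ===== LEMMAS AND PROOFS =====

theorem pvLoop_eq (t pat : List Char) (mm : Int) (acc : List Int) (s : Nat) :
    pvLoopA t pat mm acc s = pvLoopB t pat mm acc s := by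
  fun_induction pvLoopA t pat mm acc s with
  | case1 positions start idx h =>
    rw [pvLoopB]
    rcases h with h | h
    · split
      · rw [dif_pos h]
      · rfl
    · rw [if_neg (by omega)]
  | case2 positions start idx h ih =>
    push Not at h
    rw [pvLoopB, if_pos (by omega), dif_neg h.1]
    exact ih

theorem pvLoopA_nonneg (t pat : List Char) (mm : Int) (acc : List Int) (s : Nat)
    (hacc : ∀ p ∈ acc, 0 ≤ p) : ∀ p ∈ pvLoopA t pat mm acc s, 0 ≤ p := by
  fun_induction pvLoopA t pat mm acc s with
  | case1 positions start idx h => exact hacc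
  | case2 positions start idx h ih =>
    push Not at h
    refine ih ?_
    intro p hp
    rcases List.mem_append.1 hp with hp | hp
    · exact hacc p hp
    · have hb := pvFindFrom_bounds t pat start h.1
      simp at hp
      subst hp
      have : (0:Int) ≤ (start:Int) := by positivity
      omega

theorem pvFlatMap_congr {α β : Type} (l : List α) {f g : α → List β}
    (h : ∀ x ∈ l, f x = g x) : l.flatMap f = l.flatMap g := by
  induction l with
  | nil => rfl
  | cons x xs ih =>
    simp only [List.flatMap_cons, h x (List.mem_cons_self), ih (fun y hy => h y (List.mem_cons_of_mem _ hy))]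

theorem pvWindow_eq (m : List (List Char)) (lo hi : Int) (hlo : 0 ≤ lo) (hhi0 : 0 ≤ hi)
    (hhil : hi ≤ (m.length : Int)) :
    ((PySem.List.enumerate (PySem.List.slice m (some lo) (some hi)) 0).map
       (fun p => "  L".toList ++ (PySem.Int.toStr (lo + p.1 + 1)).toList ++ ": ".toList ++ p.2)).flatMap
      (fun y => ['\n'] ++ y)
    = (PySem.List.pyRange lo hi 1).flatMap (fun j =>
        "\n  L".toList ++ (PySem.Int.toStr (j + 1)).toList ++ ": ".toList ++ PySem.List.pyGetD m j []) := by
  have hctx : PySem.List.slice m (some lo) (some hi)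
      = List.take (hi.toNat - lo.toNat) (List.drop lo.toNat m) := PySem.List.slice_toNat m hlo hhi0
  rw [PySem.List.enumerate_eq_map_pyRange _ ([] : List Char)]
  rw [List.map_map, List.flatMap_map, PySem.List.pyRange_one, PySem.List.pyRange_one,
      List.flatMap_map, List.flatMap_map]
  have hlen : ((PySem.List.len (PySem.List.slice m (some lo) (some hi)) : Int) - 0).toNat
      = (hi - lo).toNat := by
    rw [PySem.List.len_eq, hctx]
    simp [List.length_take, List.length_drop]
    omega
  rw [hlen]
  apply pvFlatMap_congr
  intro k hk
  have hkn : k < (hi - lo).toNat := List.mem_range.1 hk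
  simp only [Function.comp]
  have h0k : (0 : Int) + (k : Int) = ((k : Nat) : Int) := by omega
  have hlok : lo + (k : Int) = ((lo.toNat + k : Nat) : Int) := by push_cast; omega
  rw [h0k, PySem.List.pyGetD_natCast, hlok, PySem.List.pyGetD_natCast, hctx]
  have hget : (List.take (hi.toNat - lo.toNat) (List.drop lo.toNat m)).getD k ([] : List Char)
      = m.getD (lo.toNat + k) ([] : List Char) := by
    simp [List.getD, List.getElem?_drop, (by omega : k < hi.toNat - lo.toNat)]
  rw [hget]
  have hpre : ("\n  L".toList : List Char) = '\n' :: "  L".toList := by decide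
  rw [hpre]
  simp

theorem pvCountGo (c : Char) (l : List Char) (fuel acc : Nat) (h : l.length ≤ fuel) :
    PySem.Chars.count.go [c] fuel l acc = acc + l.count c := by
  induction l generalizing fuel acc with
  | nil => cases fuel <;> simp [PySem.Chars.count.go]
  | cons x xs ih =>
    cases fuel with
    | zero => simp at h
    | succ n =>
      rw [PySem.Chars.count.go]
      by_cases hc : c = x
      · subst hc
        have hpre : [c].isPrefixOf (c :: xs) = true := by simp [List.isPrefixOf]
        simp only [hpre, if_true, List.length_cons, List.length_nil, Nat.zero_add, List.drop_succ_cons, List.drop_zero]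
        rw [ih n (acc + 1) (by simpa using h)]
        simp [List.count_cons]
        omega
      · have hpre : ([c].isPrefixOf (x :: xs)) = false := by
          simp [List.isPrefixOf]
          intro hb
          exact absurd hb hc
        simp only [hpre, Bool.false_eq_true, if_false]
        rw [ih n acc (by simpa using h)]
        simp [List.count_cons, Ne.symm hc]
theorem pvCount_single (c : Char) (s : List Char) :
    PySem.Chars.count s [c] = s.count c := by
  rw [PySem.Chars.count]
  simp [pvCountGo c s s.length 0 le_rfl]
theorem pvBisect_eq_countP (xs : List Int) (x : Int) (h : xs.Pairwise (· ≤ ·)) :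
    PySem.List.bisectLeft xs x = xs.countP (fun y => decide (y < x)) := by
  obtain ⟨hb, hlt, hge⟩ := PySem.List.bisectLeft_spec xs x h
  set b := PySem.List.bisectLeft xs x with hbdef
  have hsplit : xs = xs.take b ++ xs.drop b := (List.take_append_drop b xs).symm
  rw [hsplit, List.countP_append]
  have h1 : (xs.take b).countP (fun y => decide (y < x)) = b := by
    rw [List.countP_eq_length.2, List.length_take_of_le hb]
    intro y hy
    obtain ⟨i, hi, rfl⟩ := List.mem_iff_getElem.1 hy
    have hib : i < b := by simpa using (List.length_take .. ▸ hi : i < min b xs.length).trans_le (min_le_left _ _) |>.trans_le le_rfl |> fun _ => by have := hi; simp [List.length_take] at this; omega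
    rw [List.getElem_take]
    exact decide_eq_true (hlt i (by have := hi; simp [List.length_take] at this; omega) hib)
  have h2 : (xs.drop b).countP (fun y => decide (y < x)) = 0 := by
    rw [List.countP_eq_zero]
    intro y hy
    obtain ⟨i, hi, rfl⟩ := List.mem_iff_getElem.1 hy
    rw [List.getElem_drop]
    have hlen : b + i < xs.length := by have := hi; simp [List.length_drop] at this; omega
    simp only [decide_eq_true_eq]
    push Not
    exact hge (b + i) hlen (Nat.le_add_right _ _)
  omega

theorem pvCountEnum (t : List Char) (s k : Nat) :
    ((((PySem.List.enumerate t (s : Int)).filter (fun p => p.2 == '\n')).map (·.1)).countP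
      (fun i => decide (i < (k : Int)))) = (t.take (k - s)).count '\n' := by
  induction t generalizing s with
  | nil => simp [PySem.List.enumerate_nil]
  | cons c cs ih =>
    rw [PySem.List.enumerate_cons]
    have hcast : ((s : Int) + 1) = ((s + 1 : Nat) : Int) := by push_cast; ring
    by_cases hc : c = '\n' <;> by_cases hk : s < k
    · have htake : (k - s) = (k - (s+1)) + 1 := by omega
      simp only [List.filter_cons, hc, beq_self_eq_true, if_true, List.map_cons, List.countP_cons,
        hcast, ih (s+1), htake, List.take_succ_cons, List.count_cons]
      simp
      omega
    · -- c = '\n', k ≤ s : prefix empty, head index ≥ k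
      have hks : k - s = 0 := by omega
      simp only [List.filter_cons, hc, beq_self_eq_true, if_true, List.map_cons, List.countP_cons,
        hcast, ih (s+1), hks]
      have hks1 : k - (s+1) = 0 := by omega
      simp [hks1, hk]
    · -- c ≠ '\n', s < k
      have htake : (k - s) = (k - (s+1)) + 1 := by omega
      simp only [List.filter_cons, beq_iff_eq, hc, if_false, hcast, ih (s+1), htake,
        List.take_succ_cons, List.count_cons]
      simp [hc]
    · have hks : k - s = 0 := by omega
      have hks1 : k - (s+1) = 0 := by omega
      simp only [List.filter_cons, beq_iff_eq, hc, if_false, hcast, ih (s+1), hks, hks1]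
      simp

theorem pvNlSorted (t : List Char) :
    ((((PySem.List.enumerate t 0).filter (fun p => p.2 == '\n')).map (·.1)) : List Int).Pairwise (· ≤ ·) := by
  have h := PySem.List.pairwise_lt_enumerate t 0
  have h2 := h.filter (fun p => p.2 == '\n')
  have h3 := h2.map (·.1) (by intro a b hab; exact hab)
  exact h3.imp le_of_lt
theorem pvLine_eq (t : List Char) (pos : Int) (hpos : 0 ≤ pos) :
    ((PySem.List.bisectLeft (((PySem.List.enumerate t 0).filter (fun p => p.2 == '\n')).map (·.1)) pos : Nat) : Int)
      = (PySem.Chars.count (PySem.Chars.slice t none (some pos)) ['\n'] : Int) := by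
  have hpn : ((pos.toNat : Nat) : Int) = pos := Int.toNat_of_nonneg hpos
  rw [pvBisect_eq_countP _ _ (pvNlSorted t)]
  have hslice : PySem.Chars.slice t none (some pos) = t.take pos.toNat := by
    rw [PySem.Chars.slice_eq_listSlice]; exact PySem.List.slice_to t hpos
  rw [hslice, pvCount_single]
  have h := pvCountEnum t 0 pos.toNat
  rw [Nat.sub_zero] at h
  rw [← hpn]
  norm_cast at h ⊢

theorem pvBlock_eq (t : List Char) (pos : Int) (hpos : 0 ≤ pos) :
    ((("\n--- Match at line ".toList
        ++ (PySem.Int.toStr ((PySem.Chars.count (PySem.Chars.slice t none (some pos)) ['\n'] : Int) + 1)).toList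
        ++ " ---".toList)
      :: (PySem.List.enumerate (PySem.List.slice (PySem.Chars.splitlines t)
            (some (max 0 (((PySem.Chars.count (PySem.Chars.slice t none (some pos)) ['\n'] : Int) + 1) - 3)))
            (some (min ((PySem.Chars.splitlines t).length : Int)
              (((PySem.Chars.count (PySem.Chars.slice t none (some pos)) ['\n'] : Int) + 1) + 3)))) 0).map
          (fun p => "  L".toList
            ++ (PySem.Int.toStr (max 0 (((PySem.Chars.count (PySem.Chars.slice t none (some pos)) ['\n'] : Int) + 1) - 3) + p.1 + 1)).toList
            ++ ": ".toList ++ p.2)).flatMap (fun y => ['\n'] ++ y))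
    = ("\n\n--- Match at line ".toList
        ++ (PySem.Int.toStr ((PySem.List.bisectLeft (((PySem.List.enumerate t 0).filter (fun p => p.2 == '\n')).map (·.1)) pos : Int) + 1)).toList
        ++ " ---".toList
        ++ (PySem.List.pyRange
              (max 0 (((PySem.List.bisectLeft (((PySem.List.enumerate t 0).filter (fun p => p.2 == '\n')).map (·.1)) pos : Int) + 1) - 3))
              (min ((PySem.Chars.splitlines t).length : Int)
                (((PySem.List.bisectLeft (((PySem.List.enumerate t 0).filter (fun p => p.2 == '\n')).map (·.1)) pos : Int) + 1) + 3)) 1).flatMap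
            (fun j => "\n  L".toList ++ (PySem.Int.toStr (j + 1)).toList ++ ": ".toList
              ++ PySem.List.pyGetD (PySem.Chars.splitlines t) j [])) := by
  rw [pvLine_eq t pos hpos]
  set m := PySem.Chars.splitlines t with hm
  set L : Int := (PySem.Chars.count (PySem.Chars.slice t none (some pos)) ['\n'] : Int) + 1 with hLdef
  have hL1 : 1 ≤ L := by omega
  rw [List.flatMap_cons]
  rw [pvWindow_eq m (max 0 (L - 3)) (min (m.length : Int) (L + 3)) (le_max_left _ _)
        (le_min (by omega) (by omega)) (min_le_left _ _)]
  have hpre : ("\n\n--- Match at line ".toList : List Char) = '\n' :: "\n--- Match at line ".toList := by decide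
  rw [hpre]
  simp

theorem pvJoin_eq (sep : List Char) (x : List Char) (l : List (List Char)) :
    PySem.Chars.join sep (x :: l) = x ++ l.flatMap (fun y => sep ++ y) := by
  induction l generalizing x with
  | nil => simp [PySem.Chars.join_singleton]
  | cons y ys ih =>
    rw [PySem.Chars.join_cons_cons, ih y]
    simp

theorem pvFoldl_cons_append {a b : Type} (h : a → b) (g : a → List b) (l : List a) (acc : List b) :
    l.foldl (fun parts x => parts ++ [h x] ++ g x) acc = acc ++ l.flatMap (fun x => h x :: g x) := by
  induction l generalizing acc with
  | nil => simp
  | cons y ys ih => simp [ih, List.append_assoc, List.flatMap_def]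

theorem pvFoldl_chain4 (r : List Int) (out : List Char) (f1 f2 f3 f4 : Int → List Char) :
    r.foldl (fun out j => out ++ f1 j ++ f2 j ++ f3 j ++ f4 j) out
      = out ++ r.flatMap (fun j => f1 j ++ f2 j ++ f3 j ++ f4 j) := by
  induction r generalizing out with
  | nil => simp
  | cons y ys ih => simp [ih, List.append_assoc, List.flatMap_def]

theorem pvFoldlB_eq (P : List Int) (m0 : List Char) (h1 h2 h3 : Int → List Char)
    (r : Int → List Int) (f1 f2 f3 f4 : Int → Int → List Char) :
    P.foldl (fun out pos => (r pos).foldl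
        (fun out j => out ++ f1 pos j ++ f2 pos j ++ f3 pos j ++ f4 pos j)
        (out ++ h1 pos ++ h2 pos ++ h3 pos)) m0
      = m0 ++ P.flatMap (fun pos => h1 pos ++ h2 pos ++ h3 pos
          ++ (r pos).flatMap (fun j => f1 pos j ++ f2 pos j ++ f3 pos j ++ f4 pos j)) := by
  induction P generalizing m0 with
  | nil => simp
  | cons p ps ih =>
    rw [List.foldl_cons, pvFoldl_chain4, ih]
    simp [List.append_assoc]

-- ===== VERDICT (by name: the statement is the Claim_ definition above) =====
set_option maxHeartbeats 2000000 in
theorem get_match_context_py_spec : Claim_equal_get_match_context_py := by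
  unfold Claim_equal_get_match_context_py
  intro text pattern mm _
  unfold Spec_get_match_context_py get_match_context_py get_match_context_py_alt
  simp only
  rw [← pvLoop_eq]
  have hpos := pvLoopA_nonneg text.toList pattern.toList mm [] 0 (by simp)
  set P := pvLoopA text.toList pattern.toList mm [] 0 with hP
  by_cases hnil : P = []
  · simp [hnil]
  · simp only [if_neg hnil]
    congr 1
    rw [pvFoldl_cons_append, List.singleton_append, pvJoin_eq]
    rw [pvFoldlB_eq P ("Matches found at:".toList)
        (fun pos => "\n\n--- Match at line ".toList)
        (fun pos => (PySem.Int.toStr ((PySem.List.bisectLeft (((PySem.List.enumerate text.toList 0).filter (fun p => p.2 == '\n')).map (·.1)) pos : Int) + 1)).toList)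
        (fun pos => " ---".toList)
        (fun pos => PySem.List.pyRange
            (max 0 (((PySem.List.bisectLeft (((PySem.List.enumerate text.toList 0).filter (fun p => p.2 == '\n')).map (·.1)) pos : Int) + 1) - 3))
            (min ((PySem.Chars.splitlines text.toList).length : Int)
              (((PySem.List.bisectLeft (((PySem.List.enumerate text.toList 0).filter (fun p => p.2 == '\n')).map (·.1)) pos : Int) + 1) + 3)) 1)
        (fun pos j => "\n  L".toList)
        (fun pos j => (PySem.Int.toStr (j + 1)).toList)
        (fun pos j => ": ".toList)
        (fun pos j => PySem.List.pyGetD (PySem.Chars.splitlines text.toList) j [])]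
    rw [List.flatMap_assoc]
    refine congrArg (fun z => "Matches found at:".toList ++ z) ?_
    apply pvFlatMap_congr
    intro pos hmem
    have h0 : (0 : Int) ≤ pos := hpos pos hmem
    simpa [List.append_assoc] using pvBlock_eq text.toList pos h0
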